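-- pv_equiv track=rewrite | github.com/glasgow-ipl/ips-protodesc-code | parse_rfc_txt.py | depaginate
-- ===== SOURCE A (Python) =====
-- def depaginate(lines):
--     depaginated_lines = []
--     for i in range(len(lines)):
--         line_no = i - (56 * int(i/56))
--         if line_no not in [53, 54, 55, 0, 1, 2]:
--             if line_no == 52 and i+8 < len(lines):
--                 indent_prev = len(lines[i-1]) - len(lines[i-1].lstrip())
--                 indent_next = len(lines[i+8]) - len(lines[i+8].lstrip())
--                 if (indent_prev == indent_next):
--                     continue
--             depaginated_lines.append(lines[i])
--     return depaginated_lines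
-- ===== SOURCE B (Python) =====
-- def depaginate(lines):
--     n = len(lines)
--     out = []
--     for p in range(0, n, 56):
--         out.extend(lines[p + 3 : p + 52])
--         i = p + 52
--         if i < n:
--             if i + 8 < n:
--                 prev, nxt = lines[i - 1], lines[i + 8]
--                 if len(prev) - len(prev.lstrip()) != len(nxt) - len(nxt.lstrip()):
--                     out.append(lines[i])
--             else:
--                 out.append(lines[i])
--     return out
-- ===== Notes on version B (the rewrite author's own statement) =====
-- stated objective: faster
-- what changed: A tests every line individually with a per-index mod-56 computation and a membership test; B never examines lines one by one: it copies each page's 49 body lines in a single slice lines[p+3:p+52] and only performs one explicit check per page, at the boundary index p+52, with absolute indexing for the i-1/i+8 indentation lookups. Mechanism: the Python-level per-line loop and the per-index division/membership work are replaced by one C-level slice copy per 56-line page.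
import Mathlib
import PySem

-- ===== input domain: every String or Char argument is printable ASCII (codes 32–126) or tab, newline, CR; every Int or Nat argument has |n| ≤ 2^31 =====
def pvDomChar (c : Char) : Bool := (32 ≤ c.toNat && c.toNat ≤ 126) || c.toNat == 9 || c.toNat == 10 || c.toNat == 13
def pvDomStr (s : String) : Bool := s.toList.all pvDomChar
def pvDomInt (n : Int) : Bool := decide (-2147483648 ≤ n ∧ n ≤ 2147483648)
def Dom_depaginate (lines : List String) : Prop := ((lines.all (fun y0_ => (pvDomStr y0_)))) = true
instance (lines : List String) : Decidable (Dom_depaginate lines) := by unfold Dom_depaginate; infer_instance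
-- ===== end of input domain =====

-- B replaces A's per-line mod-56 filter loop with slice-based block copying: each page's body
-- lines[p+3:p+52] is copied in one slice, and only the single boundary line p+52 is tested.

-- leading-whitespace width: len(s) - len(s.lstrip()); indices below are always in range, so getD "" is exact
def pvIndent (s : String) : Int := PySem.Str.len s - PySem.Str.len (PySem.Str.lstrip s)

-- ===== PORT A =====
def depaginate (lines : List String) : List String :=
  (List.range lines.length).foldl (fun acc i =>
    let lineNo := i - 56 * (i / 56)
    if lineNo ∉ ([53, 54, 55, 0, 1, 2] : List Nat) then
      if lineNo = 52 ∧ i + 8 < lines.length then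
        if pvIndent (lines.getD (i - 1) "") = pvIndent (lines.getD (i + 8) "") then
          acc
        else
          acc ++ [lines.getD i ""]
      else
        acc ++ [lines.getD i ""]
    else acc) []

-- ===== PORT B =====
-- one iteration of Source B's loop body: slice copy of the page body, then the single test at i = p+52
def pvPage (lines : List String) (p : Nat) : List String :=
  PySem.List.slice lines (some ((p + 3 : Nat) : Int)) (some ((p + 52 : Nat) : Int)) ++
  (if p + 52 < lines.length then
    if p + 52 + 8 < lines.length then
      if pvIndent (lines.getD (p + 52 - 1) "") ≠ pvIndent (lines.getD (p + 52 + 8) "") then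
        [lines.getD (p + 52) ""]
      else []
    else [lines.getD (p + 52) ""]
  else [])

-- "for p in range(0, n, 56)" of Source B
def pvPages (lines : List String) (p : Nat) : List String :=
  if p < lines.length then pvPage lines p ++ pvPages lines (p + 56) else []
termination_by lines.length - p

def depaginate_alt (lines : List String) : List String := pvPages lines 0

-- ===== PRECONDITION & SPEC =====
def Spec_depaginate (lines : List String) (out : List String) : Prop := out = depaginate_alt lines
instance (lines : List String) (out : List String) : Decidable (Spec_depaginate lines out) := by unfold Spec_depaginate; infer_instance

-- ===== CLAIM (what is proved, stated in full; the proofs are below) =====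
def Claim_equal_depaginate : Prop := ∀ (lines : List String), Dom_depaginate lines → Spec_depaginate lines (depaginate lines)

-- ===== LEMMAS AND PROOFS =====

-- the common characterisation: keep index i iff it is neither in the top/bottom margin
-- nor the footer line whose neighbours' indentation matches
def pvKeep (lines : List String) (i : Nat) : Bool :=
  decide (i % 56 ∉ ([53, 54, 55, 0, 1, 2] : List Nat) ∧
    ¬ (i % 56 = 52 ∧ i + 8 < lines.length ∧
        pvIndent (lines.getD (i - 1) "") = pvIndent (lines.getD (i + 8) "")))

def pvGet (lines : List String) (i : Nat) : String := lines.getD i ""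

theorem depaginate_foldl (lines : List String) (l : List Nat) (acc : List String) :
    l.foldl (fun acc i =>
      let lineNo := i - 56 * (i / 56)
      if lineNo ∉ ([53, 54, 55, 0, 1, 2] : List Nat) then
        if lineNo = 52 ∧ i + 8 < lines.length then
          if pvIndent (lines.getD (i - 1) "") = pvIndent (lines.getD (i + 8) "") then
            acc
          else
            acc ++ [lines.getD i ""]
        else
          acc ++ [lines.getD i ""]
      else acc) acc
    = acc ++ (l.filter (pvKeep lines)).map (pvGet lines) := by
  induction l generalizing acc with
  | nil => simp
  | cons i t ih =>
    have hmod : i - 56 * (i / 56) = i % 56 := by omega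
    simp only [List.foldl_cons]
    rw [ih, List.filter_cons]
    simp only [hmod]
    by_cases h1 : i % 56 ∈ ([53, 54, 55, 0, 1, 2] : List Nat)
    · have hk : pvKeep lines i = false := by
        unfold pvKeep; rw [decide_eq_false_iff_not]; intro h; exact h.1 h1
      rw [if_neg (not_not_intro h1), hk]
      simp
    · by_cases h2 : i % 56 = 52 ∧ i + 8 < lines.length
      · by_cases h3 : pvIndent (lines.getD (i - 1) "") = pvIndent (lines.getD (i + 8) "")
        · have hk : pvKeep lines i = false := by
            unfold pvKeep; rw [decide_eq_false_iff_not]; intro h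
            exact h.2 ⟨h2.1, h2.2, h3⟩
          rw [if_pos h1, if_pos h2, if_pos h3, hk]
          simp
        · have hk : pvKeep lines i = true := by
            unfold pvKeep; rw [decide_eq_true_eq]
            exact ⟨h1, fun h => h3 h.2.2⟩
          rw [if_pos h1, if_pos h2, if_neg h3, hk]
          simp [pvGet]
      · have hk : pvKeep lines i = true := by
          unfold pvKeep; rw [decide_eq_true_eq]
          exact ⟨h1, fun h => h2 ⟨h.1, h.2.1⟩⟩
        rw [if_pos h1, if_neg h2, hk]
        simp [pvGet]

theorem depaginate_char (lines : List String) :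
    depaginate lines
      = ((List.range lines.length).filter (pvKeep lines)).map (pvGet lines) := by
  have := depaginate_foldl lines (List.range lines.length) []
  simpa [depaginate] using this

-- a clamped drop/take block is the in-range indices mapped through pvGet
theorem sliceMap (lines : List String) (k a : Nat) :
    ((List.range' a k).filter (fun i => decide (i < lines.length))).map (pvGet lines)
      = (lines.drop a).take k := by
  induction k generalizing a with
  | zero => simp
  | succ k ih =>
    rw [List.range'_succ, List.filter_cons]
    by_cases h : a < lines.length
    · have hdrop : lines.drop a = lines[a] :: lines.drop (a + 1) :=
        List.drop_eq_getElem_cons h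
      simp only [h, decide_true, if_true, List.map_cons, ih, hdrop, List.take_succ_cons]
      congr 1
      simp [pvGet, List.getD, h]
    · have hd : lines.drop a = [] := List.drop_eq_nil_of_le (by omega)
      have hd1 : lines.drop (a + 1) = [] := List.drop_eq_nil_of_le (by omega)
      have hda : (decide (a < lines.length)) = false := by simp [h]
      rw [hda]
      simp only [Bool.false_eq_true, if_false]
      rw [ih, hd, hd1]
      simp

theorem pvPage_char (lines : List String) (p : Nat) (hp : p % 56 = 0) :
    pvPage lines p
      = ((List.range' (p + 3) 50).filter
          (fun i => decide (i < lines.length) && pvKeep lines i)).map (pvGet lines) := by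
  set n := lines.length with hn
  have hsplit : List.range' (p + 3) 50
      = List.range' (p + 3) 49 ++ List.range' (p + 52) 1 := by
    rw [List.range'_append_1]
  rw [hsplit, List.filter_append, List.map_append]
  -- body block: offsets 3..51 always kept, so the combined filter is just the range check
  have hbody : (List.range' (p + 3) 49).filter (fun i => decide (i < n) && pvKeep lines i)
      = (List.range' (p + 3) 49).filter (fun i => decide (i < n)) := by
    apply List.filter_congr
    intro j hj
    have hjr := List.mem_range'_1.mp hj
    have hk : pvKeep lines j = true := by
      unfold pvKeep; rw [decide_eq_true_eq]
      have hm : j % 56 = j - p := by omega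
      constructor
      · rw [hm]
        simp only [List.mem_cons, List.not_mem_nil, or_false]
        omega
      · intro h
        rw [hm] at h
        omega
    simp [hk]
  -- boundary element p + 52
  have hm52 : (p + 52) % 56 = 52 := by omega
  have hbound : ((List.range' (p + 52) 1).filter (fun i => decide (i < n) && pvKeep lines i)).map (pvGet lines)
      = (if p + 52 < n then
          if p + 52 + 8 < n then
            if pvIndent (lines.getD (p + 52 - 1) "") ≠ pvIndent (lines.getD (p + 52 + 8) "") then
              [lines.getD (p + 52) ""]
            else []
          else [lines.getD (p + 52) ""]
        else []) := by
    have hone : List.range' (p + 52) 1 = [p + 52] := by simp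
    rw [hone]
    by_cases h1 : p + 52 < n
    · by_cases h2 : p + 52 + 8 < n
      · by_cases h3 : pvIndent (lines.getD (p + 52 - 1) "") = pvIndent (lines.getD (p + 52 + 8) "")
        · have hk : pvKeep lines (p + 52) = false := by
            unfold pvKeep; rw [decide_eq_false_iff_not]; intro h
            exact h.2 ⟨hm52, h2, h3⟩
          have h51 : p + 52 - 1 = p + 51 := by omega
          rw [h51] at h3
          simp only [List.getD] at h3
          simp [hk, h1, h2, h3]
        · have hk : pvKeep lines (p + 52) = true := by
            unfold pvKeep; rw [decide_eq_true_eq]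
            refine ⟨?_, fun h => h3 h.2.2⟩
            rw [hm52]; decide
          have h51 : p + 52 - 1 = p + 51 := by omega
          rw [h51] at h3
          simp only [List.getD] at h3
          simp [hk, h1, h2, h3, pvGet]
      · have hk : pvKeep lines (p + 52) = true := by
          unfold pvKeep; rw [decide_eq_true_eq]
          refine ⟨?_, fun h => h2 h.2.1⟩
          rw [hm52]; decide
        simp [hk, h1, h2, pvGet]
    · simp [h1]
  rw [hbody, hbound]
  unfold pvPage
  congr 1
  rw [PySem.List.slice_natCast]
  have h49 : p + 52 - (p + 3) = 49 := by omega
  rw [h49, sliceMap]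

theorem pvPages_char (lines : List String) (p : Nat) (hp : p % 56 = 0) :
    pvPages lines p
      = ((List.range' p (lines.length - p)).filter (pvKeep lines)).map (pvGet lines) := by
  fun_induction pvPages lines p with
  | case1 p hlt ih =>
    set n := lines.length with hndef
    have hm : min 56 (n - p) + (n - (p + 56)) = n - p := by omega
    have hsplit : List.range' p (n - p)
        = List.range' p (min 56 (n - p)) ++ List.range' (p + min 56 (n - p)) (n - (p + 56)) := by
      rw [List.range'_append_1, hm]
    rw [hsplit, List.filter_append, List.map_append]
    have hIH := ih (by omega)
    have htail : ((List.range' (p + min 56 (n - p)) (n - (p + 56))).filter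
          (pvKeep lines)).map (pvGet lines) = pvPages lines (p + 56) := by
      rcases Nat.le_total (n - p) 56 with hle | hge
      · have h0 : n - (p + 56) = 0 := by omega
        rw [hIH, h0]
        simp
      · have h56 : min 56 (n - p) = 56 := by omega
        rw [hIH, h56]
    rw [htail]
    congr 1
    rw [pvPage_char lines p hp]
    congr 1
    have hA : (List.range' p (min 56 (n - p))).filter (pvKeep lines)
        = (List.range' p 56).filter (fun i => decide (i < n) && pvKeep lines i) := by
      have h56 : List.range' p 56
          = List.range' p (min 56 (n - p)) ++ List.range' (p + min 56 (n - p)) (56 - min 56 (n - p)) := by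
        rw [List.range'_append_1]
        congr 1
        omega
      rw [h56, List.filter_append]
      have hleft : (List.range' p (min 56 (n - p))).filter (fun i => decide (i < n) && pvKeep lines i)
          = (List.range' p (min 56 (n - p))).filter (pvKeep lines) := by
        apply List.filter_congr
        intro j hj
        have := List.mem_range'_1.mp hj
        have hjn : j < n := by omega
        simp [hjn]
      have hright : (List.range' (p + min 56 (n - p)) (56 - min 56 (n - p))).filter
          (fun i => decide (i < n) && pvKeep lines i) = [] := by
        rw [List.filter_eq_nil_iff]
        intro j hj
        have := List.mem_range'_1.mp hj
        have hjn : ¬ (j < n) := by omega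
        simp [hjn]
      rw [hleft, hright, List.append_nil]
    have hB : (List.range' (p + 3) 50).filter (fun i => decide (i < n) && pvKeep lines i)
        = (List.range' p 56).filter (fun i => decide (i < n) && pvKeep lines i) := by
      have hsp : List.range' p 56
          = List.range' p 3 ++ (List.range' (p + 3) 50 ++ List.range' (p + 53) 3) := by
        rw [List.range'_append_1, List.range'_append_1]
      rw [hsp, List.filter_append, List.filter_append]
      have hmargin : ∀ (j : Nat), (j ∈ List.range' p 3 ∨ j ∈ List.range' (p + 53) 3) →
          pvKeep lines j = false := by
        intro j hj
        have hb : (p ≤ j ∧ j < p + 3) ∨ (p + 53 ≤ j ∧ j < p + 56) := by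
          rcases hj with h | h
          · exact Or.inl (by simpa using List.mem_range'_1.mp h)
          · exact Or.inr (by simpa using List.mem_range'_1.mp h)
        unfold pvKeep; rw [decide_eq_false_iff_not]; intro hK
        apply hK.1
        have hr : j % 56 = j - p := by omega
        rw [hr]
        simp only [List.mem_cons, List.not_mem_nil, or_false]
        omega
      have hfirst : (List.range' p 3).filter (fun i => decide (i < n) && pvKeep lines i) = [] := by
        rw [List.filter_eq_nil_iff]
        intro j hj
        simp [hmargin j (Or.inl hj)]
      have hlast : (List.range' (p + 53) 3).filter (fun i => decide (i < n) && pvKeep lines i) = [] := by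
        rw [List.filter_eq_nil_iff]
        intro j hj
        simp [hmargin j (Or.inr hj)]
      rw [hfirst, hlast, List.append_nil]
      simp
    rw [hA, ← hB]
  | case2 p hge =>
    have h0 : lines.length - p = 0 := by omega
    simp [h0]

-- ===== VERDICT (by name: the statement is the Claim_ definition above) =====
theorem depaginate_spec : Claim_equal_depaginate := by
  intro lines _
  unfold Spec_depaginate depaginate_alt
  rw [depaginate_char, pvPages_char lines 0 (by omega)]
  simp [List.range_eq_range']
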